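-- pv_equiv track=rewrite | github.com/pypi-data/pypi-mirror-399 | packages/ewoksutils/ewoksutils-1.9.1.tar.gz/ewoksutils-1.9.1/src/ewoksutils/uri_utils.py | _merge_query
-- ===== SOURCE A (Python) =====
-- from typing import Iterable
-- from typing import Tuple
--
-- def _split_query(query: str) -> dict:
--     result = dict()
--     for s in query.split("&"):
--         if not s:
--             continue
--         name, _, value = s.partition("=")
--         prev_value = result.get(name)
--         if prev_value:
--             value = _join_string(prev_value, value, "/")
--         result[name] = value
--     return result
--
-- def _join_query(query_items: Iterable[Tuple[str, str]]) -> str: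
--     return "&".join(f"{k}={v}" for k, v in query_items)
--
-- def _join_string(a: str, b: str, sep: str) -> str:
--     aslash = a.endswith(sep)
--     bslash = b.startswith(sep)
--     if aslash and bslash:
--         return a[:-1] + b
--     if aslash or bslash:
--         return a + b
--     return a + sep + b
--
-- def _merge_query(query1: str, query2: str) -> str:
--     query1 = _split_query(query1)
--     query2 = _split_query(query2)
--     merged = []
--
--     for name in list(query1) + list(query2):
--         value1 = query1.pop(name, None)
--         value2 = query2.pop(name, None)
--         if value1 and value2:
--             merged.append((name, _join_string(value1, value2, "/")))
--         elif value1: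
--             merged.append((name, value1))
--         elif value2:
--             merged.append((name, value2))
--
--     return _join_query(merged)
-- ===== SOURCE B (Python) =====
-- def _split_query(query):
--     result = dict()
--     for s in query.split("&"):
--         if not s:
--             continue
--         name, _, value = s.partition("=")
--         prev_value = result.get(name)
--         if prev_value:
--             value = _join_string(prev_value, value, "/")
--         result[name] = value
--     return result
--
--
-- def _join_query(query_items):
--     return "&".join(f"{k}={v}" for k, v in query_items)
--
--
-- def _join_string(a, b, sep):
--     aslash = a.endswith(sep)
--     bslash = b.startswith(sep)
--     if aslash and bslash:
--         return a[:-1] + b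
--     if aslash or bslash:
--         return a + b
--     return a + sep + b
--
--
-- def _merge_query(query1, query2):
--     d1 = _split_query(query1)
--     d2 = _split_query(query2)
--     merged = []
--     for name, v1 in d1.items():
--         v2 = d2.get(name)
--         if v1 and v2:
--             merged.append((name, _join_string(v1, v2, "/")))
--         elif v1:
--             merged.append((name, v1))
--         elif v2:
--             merged.append((name, v2))
--     for name, v2 in d2.items():
--         if name not in d1 and v2:
--             merged.append((name, v2))
--     return _join_query(merged)
-- ===== Notes on version B (the rewrite author's own statement) =====
-- stated objective: alternative
-- what changed: Replaces A's single pass over the concatenated key lists with destructive dict.pop deduplication by two non-mutating passes: one over d1.items() joining with d2.get(name), one over d2.items() keeping only keys absent from d1.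
import Mathlib
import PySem

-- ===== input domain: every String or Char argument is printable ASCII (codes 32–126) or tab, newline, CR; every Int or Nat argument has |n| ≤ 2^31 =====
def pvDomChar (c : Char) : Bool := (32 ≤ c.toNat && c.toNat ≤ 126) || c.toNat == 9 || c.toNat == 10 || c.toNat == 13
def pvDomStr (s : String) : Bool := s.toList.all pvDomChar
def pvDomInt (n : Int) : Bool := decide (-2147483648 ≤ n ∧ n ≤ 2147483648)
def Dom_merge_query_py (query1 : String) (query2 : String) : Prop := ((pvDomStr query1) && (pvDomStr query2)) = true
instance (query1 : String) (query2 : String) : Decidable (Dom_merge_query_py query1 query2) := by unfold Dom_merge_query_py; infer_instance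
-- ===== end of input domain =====

-- B replaces A's single destructive pass (concatenated key lists + dict.pop deduplication)
-- by two non-mutating passes over d1.items() and d2.items(); return values are identical.

-- ===== PORT A =====
-- shared helpers: _join_string, _join_query, _split_query are identical in both Pythons

def join_string (a : String) (b : String) (sep : String) : String :=
  let aslash := PySem.Str.endswith a sep
  let bslash := PySem.Str.startswith b sep
  if aslash && bslash then PySem.Str.slice a none (some (-1)) ++ b
  else if aslash || bslash then a ++ b
  else a ++ sep ++ b

def join_query (query_items : List (String × String)) : String :=
  PySem.Str.join "&" (query_items.map (fun p => p.1 ++ "=" ++ p.2))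

-- s.partition("=") restricted to the (head, tail) components actually used:
-- exact via s.split("=", 1) — [a] when "=" absent (partition tail is ""), [a, b] otherwise.
def partition_eq (s : String) : String × String :=
  match PySem.Str.splitMax? s "=" 1 with
  | some [a, b] => (a, b)
  | some [a] => (a, "")
  | _ => (s, "")  -- unreachable: split never yields [] and maxsplit 1 caps at two pieces

def split_query_body (result : PySem.Dict String String) (s : String) :
    PySem.Dict String String :=
  if s == "" then result
  else
    let nv := partition_eq s
    let value := match result.get? nv.1 with
      | some pv => if pv == "" then nv.2 else join_string pv nv.2 "/"
      | none => nv.2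
    result.insert nv.1 value

def split_query (query : String) : PySem.Dict String String :=
  match PySem.Str.split? query "&" with
  | some parts => parts.foldl split_query_body PySem.Dict.empty
  | none => PySem.Dict.empty  -- unreachable: the separator "&" is non-empty

-- loop body of A's single for-loop (value1/value2 = dict.pop(name, None), then truthiness branches)
def stepA (st : List (String × String) × PySem.Dict String String × PySem.Dict String String)
    (name : String) :
    List (String × String) × PySem.Dict String String × PySem.Dict String String :=
  let merged := st.1
  let p1 := match st.2.1.pop? name with
    | some (v, d) => ((some v : Option String), d)
    | none => (none, st.2.1)
  let p2 := match st.2.2.pop? name with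
    | some (v, d) => ((some v : Option String), d)
    | none => (none, st.2.2)
  let merged := match p1.1, p2.1 with
    | some v1, some v2 =>
        if v1 != "" && v2 != "" then merged ++ [(name, join_string v1 v2 "/")]
        else if v1 != "" then merged ++ [(name, v1)]
        else if v2 != "" then merged ++ [(name, v2)]
        else merged
    | some v1, none => if v1 != "" then merged ++ [(name, v1)] else merged
    | none, some v2 => if v2 != "" then merged ++ [(name, v2)] else merged
    | none, none => merged
  (merged, p1.2, p2.2)

def merge_query_py (query1 : String) (query2 : String) : String :=
  let q1 := split_query query1
  let q2 := split_query query2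
  let res := (q1.keys ++ q2.keys).foldl stepA ([], q1, q2)
  join_query res.1

-- ===== PORT B =====
-- first loop of B: over d1.items(), looking the name up in d2
def stepB1 (d2 : PySem.Dict String String) (merged : List (String × String))
    (p : String × String) : List (String × String) :=
  match d2.get? p.1 with
  | some v2 =>
      if p.2 != "" && v2 != "" then merged ++ [(p.1, join_string p.2 v2 "/")]
      else if p.2 != "" then merged ++ [(p.1, p.2)]
      else if v2 != "" then merged ++ [(p.1, v2)]
      else merged
  | none => if p.2 != "" then merged ++ [(p.1, p.2)] else merged

-- second loop of B: over d2.items(), keeping names absent from d1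
def stepB2 (d1 : PySem.Dict String String) (merged : List (String × String))
    (p : String × String) : List (String × String) :=
  if !(d1.contains p.1) && p.2 != "" then merged ++ [p] else merged

def merge_query_py_alt (query1 : String) (query2 : String) : String :=
  let d1 := split_query query1
  let d2 := split_query query2
  let merged := d1.items.foldl (stepB1 d2) []
  let merged := d2.items.foldl (stepB2 d1) merged
  join_query merged

-- ===== PRECONDITION & SPEC =====
def Spec_merge_query_py (query1 : String) (query2 : String) (out : String) : Prop := out = merge_query_py_alt query1 query2
instance (query1 : String) (query2 : String) (out : String) : Decidable (Spec_merge_query_py query1 query2 out) := by unfold Spec_merge_query_py; infer_instance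

-- ===== CLAIM (what is proved, stated in full; the proofs are below) =====
def Claim_equal_merge_query_py : Prop := ∀ (query1 : String) (query2 : String), Dom_merge_query_py query1 query2 → Spec_merge_query_py query1 query2 (merge_query_py query1 query2)

-- ===== LEMMAS AND PROOFS =====

def eraseAll (d : PySem.Dict String String) (ks : List String) : PySem.Dict String String :=
  ks.foldl PySem.Dict.erase d

theorem get?_erase_ne (d : PySem.Dict String String) (k k' : String) (h : k' ≠ k) :
    (d.erase k).get? k' = d.get? k' := by
  obtain ⟨l⟩ := d
  simp only [PySem.Dict.erase, PySem.Dict.get?]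
  congr 1
  induction l with
  | nil => rfl
  | cons p rest ih =>
    by_cases hpk : p.1 = k
    · rw [List.filter_cons_of_neg (by simp [hpk]),
        List.find?_cons_of_neg (by simp [hpk, Ne.symm h]), ih]
    · rw [List.filter_cons_of_pos (by simp [hpk])]
      by_cases hpk' : p.1 = k'
      · rw [List.find?_cons_of_pos (by simp [hpk']), List.find?_cons_of_pos (by simp [hpk'])]
      · rw [List.find?_cons_of_neg (by simp [hpk']),
          List.find?_cons_of_neg (by simp [hpk']), ih]

theorem erase_of_get?_none (d : PySem.Dict String String) (k : String)
    (h : d.get? k = none) : d.erase k = d := by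
  obtain ⟨l⟩ := d
  simp only [PySem.Dict.get?, Option.map_eq_none_iff, List.find?_eq_none] at h
  simp only [PySem.Dict.erase, PySem.Dict.mk.injEq]
  apply List.filter_eq_self.mpr
  intro p hp
  simpa using fun e => (by simpa [e] using h p hp)

theorem get?_none_of_no_key (l : List (String × String)) (k : String)
    (h : ∀ p ∈ l, p.1 ≠ k) : (PySem.Dict.mk l).get? k = none := by
  simp only [PySem.Dict.get?]
  rw [List.find?_eq_none.mpr (fun p hp => by simpa using h p hp)]
  rfl

theorem pop?_none_of_get?_none (d : PySem.Dict String String) (k : String)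
    (h : d.get? k = none) : d.pop? k = none := by
  simp only [PySem.Dict.pop?, h, Option.map_none]

theorem pop?_some_of_get?_some (d : PySem.Dict String String) (k : String) (v : String)
    (h : d.get? k = some v) : d.pop? k = some (v, d.erase k) := by
  simp only [PySem.Dict.pop?, h, Option.map_some]

theorem pop_head (k v : String) (rest : List (String × String))
    (h : ∀ p ∈ rest, p.1 ≠ k) :
    (PySem.Dict.mk ((k, v) :: rest)).pop? k = some (v, PySem.Dict.mk rest) := by
  have hg : (PySem.Dict.mk ((k, v) :: rest)).get? k = some v := by
    rw [PySem.Dict.get?_mk_cons]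
    simp
  have he : (PySem.Dict.mk ((k, v) :: rest)).erase k = PySem.Dict.mk rest := by
    simp only [PySem.Dict.erase]
    congr 1
    rw [List.filter_cons_of_neg (by simp)]
    exact List.filter_eq_self.mpr (fun p hp => by
      have := h p hp
      simp [this])
  rw [pop?_some_of_get?_some _ _ _ hg, he]

theorem nodup_keys_body (parts : List String) (d : PySem.Dict String String)
    (h : d.keys.Nodup) : (parts.foldl split_query_body d).keys.Nodup := by
  induction parts generalizing d with
  | nil => exact h
  | cons s rest ih =>
    apply ih
    unfold split_query_body
    split
    · exact h
    · exact PySem.Dict.nodup_keys_insert _ _ _ h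

theorem nodup_keys_split_query (q : String) : (split_query q).keys.Nodup := by
  unfold split_query
  split
  · exact nodup_keys_body _ _ (by simp [PySem.Dict.empty, PySem.Dict.keys])
  · simp [PySem.Dict.empty, PySem.Dict.keys]

theorem stepB1_congr (l : List (String × String)) (acc : List (String × String))
    (d d' : PySem.Dict String String) (h : ∀ p ∈ l, d.get? p.1 = d'.get? p.1) :
    l.foldl (stepB1 d) acc = l.foldl (stepB1 d') acc := by
  induction l generalizing acc with
  | nil => rfl
  | cons p rest ih =>
    simp only [List.foldl_cons]
    rw [show stepB1 d acc p = stepB1 d' acc p by unfold stepB1; rw [h p (by simp)]]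
    exact ih _ (fun q hq => h q (by simp [hq]))

theorem phase1 (l : List (String × String)) (r2 : PySem.Dict String String)
    (acc : List (String × String)) (hnd : (l.map Prod.fst).Nodup) :
    List.foldl stepA (acc, PySem.Dict.mk l, r2) (l.map Prod.fst)
      = (l.foldl (stepB1 r2) acc, PySem.Dict.mk [], eraseAll r2 (l.map Prod.fst)) := by
  induction l generalizing r2 acc with
  | nil => simp [eraseAll]
  | cons hd rest ih =>
    obtain ⟨k, v⟩ := hd
    simp only [List.map_cons, List.nodup_cons, List.mem_map] at hnd
    obtain ⟨hk, hrest⟩ := hnd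
    have hkne : ∀ p ∈ rest, p.1 ≠ k := fun p hp he => hk ⟨p, hp, he⟩
    have hpop1 := pop_head k v rest hkne
    cases hg : r2.get? k with
    | some v2 =>
      have hpop2 := pop?_some_of_get?_some r2 k v2 hg
      have hstep : stepA (acc, PySem.Dict.mk ((k, v) :: rest), r2) k
          = (stepB1 r2 acc (k, v), PySem.Dict.mk rest, r2.erase k) := by
        simp only [stepA, hpop1, hpop2, stepB1, hg]
      rw [List.map_cons, List.foldl_cons, hstep, ih _ _ hrest, List.foldl_cons]
      simp only [eraseAll, List.foldl_cons]
      exact congrArg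
        (fun x => (x, (PySem.Dict.mk ([] : List (String × String)),
          List.foldl PySem.Dict.erase (r2.erase k) (List.map Prod.fst rest))))
        (stepB1_congr rest (stepB1 r2 acc (k, v)) (r2.erase k) r2
          (fun p hp => get?_erase_ne r2 k p.1 (hkne p hp)))
    | none =>
      have hpop2 := pop?_none_of_get?_none r2 k hg
      have hstep : stepA (acc, PySem.Dict.mk ((k, v) :: rest), r2) k
          = (stepB1 r2 acc (k, v), PySem.Dict.mk rest, r2) := by
        simp only [stepA, hpop1, hpop2, stepB1, hg]
      rw [List.map_cons, List.foldl_cons, hstep, ih _ _ hrest, List.foldl_cons]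
      simp only [eraseAll, List.foldl_cons]
      rw [erase_of_get?_none r2 k hg]

theorem phase2 (l : List (String × String)) (S : List String)
    (acc : List (String × String)) (hnd : (l.map Prod.fst).Nodup) :
    List.foldl stepA
        (acc, PySem.Dict.mk [], PySem.Dict.mk (l.filter (fun p => !(S.contains p.1))))
        (l.map Prod.fst)
      = (l.foldl (fun m p => if !(S.contains p.1) && p.2 != "" then m ++ [p] else m) acc,
         PySem.Dict.mk [], PySem.Dict.mk []) := by
  induction l generalizing acc with
  | nil => simp
  | cons hd rest ih =>
    obtain ⟨k, v⟩ := hd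
    simp only [List.map_cons, List.nodup_cons, List.mem_map] at hnd
    obtain ⟨hk, hrest⟩ := hnd
    have hkne : ∀ p ∈ rest, p.1 ≠ k := fun p hp he => hk ⟨p, hp, he⟩
    have hkne' : ∀ p ∈ rest.filter (fun p => !(S.contains p.1)), p.1 ≠ k :=
      fun p hp => hkne p (List.mem_of_mem_filter hp)
    have hpop0 : (PySem.Dict.mk ([] : List (String × String))).pop? k = none :=
      pop?_none_of_get?_none _ _ (get?_none_of_no_key [] k (by simp))
    cases hS : S.contains k with
    | true =>
      have hfl : ((k, v) :: rest).filter (fun p => !(S.contains p.1))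
          = rest.filter (fun p => !(S.contains p.1)) :=
        List.filter_cons_of_neg (by show ¬((!S.contains k) = true); rw [hS]; simp)
      have hpop2 : (PySem.Dict.mk (rest.filter
          (fun p => !(S.contains p.1)))).pop? k = none :=
        pop?_none_of_get?_none _ _ (get?_none_of_no_key _ k hkne')
      have hstep : stepA (acc, PySem.Dict.mk [],
            PySem.Dict.mk (((k, v) :: rest).filter (fun p => !(S.contains p.1)))) k
          = (acc, PySem.Dict.mk [],
            PySem.Dict.mk (rest.filter (fun p => !(S.contains p.1)))) := by
        simp only [stepA, hfl, hpop0, hpop2]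
      rw [List.map_cons, List.foldl_cons, hstep, ih _ hrest, List.foldl_cons]
      have hbody : (if !(S.contains (k, v).1) && (k, v).2 != "" then acc ++ [(k, v)] else acc)
          = acc := by
        show (if (!S.contains k && (v != "")) = true then acc ++ [(k, v)] else acc) = acc
        rw [hS]; simp
      rw [hbody]
    | false =>
      have hfl : ((k, v) :: rest).filter (fun p => !(S.contains p.1))
          = (k, v) :: rest.filter (fun p => !(S.contains p.1)) :=
        List.filter_cons_of_pos (by show (!S.contains k) = true; rw [hS]; rfl)
      have hpop2 : (PySem.Dict.mk ((k, v) :: rest.filter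
          (fun p => !(S.contains p.1)))).pop? k
          = some (v, PySem.Dict.mk (rest.filter (fun p => !(S.contains p.1)))) :=
        pop_head k v _ hkne'
      have hstep : stepA (acc, PySem.Dict.mk [],
            PySem.Dict.mk (((k, v) :: rest).filter (fun p => !(S.contains p.1)))) k
          = (if v != "" then acc ++ [(k, v)] else acc, PySem.Dict.mk [],
            PySem.Dict.mk (rest.filter (fun p => !(S.contains p.1)))) := by
        simp only [stepA, hfl, hpop0, hpop2]
      rw [List.map_cons, List.foldl_cons, hstep, ih _ hrest, List.foldl_cons]
      have hbody : (if !(S.contains (k, v).1) && (k, v).2 != "" then acc ++ [(k, v)] else acc)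
          = (if v != "" then acc ++ [(k, v)] else acc) := by
        show (if (!S.contains k && (v != "")) = true then acc ++ [(k, v)] else acc)
            = (if (v != "") = true then acc ++ [(k, v)] else acc)
        rw [hS]; simp
      rw [hbody]

theorem items_eraseAll (d : PySem.Dict String String) (ks : List String) :
    (eraseAll d ks).items = d.items.filter (fun p => !(ks.contains p.1)) := by
  induction ks generalizing d with
  | nil => simp [eraseAll]
  | cons k ks ih =>
    show (eraseAll (d.erase k) ks).items = _
    rw [ih]
    simp only [PySem.Dict.erase, List.filter_filter]
    apply List.filter_congr
    intro p hp
    simp only [List.contains_cons, Bool.not_or]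
    rw [Bool.and_comm]

theorem contains_keys (l : List (String × String)) (x : String) :
    PySem.Dict.contains (PySem.Dict.mk l) x = (l.map Prod.fst).contains x := by
  induction l with
  | nil => rfl
  | cons p rest ih =>
    simp only [PySem.Dict.contains, List.any_cons, List.map_cons, List.contains_cons]
    rw [show rest.any (fun q => q.1 == x) = PySem.Dict.contains (PySem.Dict.mk rest) x from rfl, ih]
    congr 1
    simp [eq_comm]

theorem core_merge (l1 l2 : List (String × String))
    (h1 : (l1.map Prod.fst).Nodup) (h2 : (l2.map Prod.fst).Nodup) :
    ((l1.map Prod.fst ++ l2.map Prod.fst).foldl stepA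
        ([], PySem.Dict.mk l1, PySem.Dict.mk l2)).1
      = l2.foldl (stepB2 (PySem.Dict.mk l1))
          (l1.foldl (stepB1 (PySem.Dict.mk l2)) []) := by
  rw [List.foldl_append, phase1 l1 (PySem.Dict.mk l2) [] h1]
  have he : eraseAll (PySem.Dict.mk l2) (l1.map Prod.fst)
      = PySem.Dict.mk (l2.filter (fun p => !((l1.map Prod.fst).contains p.1))) := by
    apply PySem.Dict.ext
    rw [items_eraseAll]
  rw [he, phase2 l2 (l1.map Prod.fst) _ h2]
  show List.foldl _ _ l2 = List.foldl _ _ l2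
  congr 1
  funext m p
  simp only [stepB2, contains_keys]

-- ===== VERDICT (by name: the statement is the Claim_ definition above) =====
theorem merge_query_py_spec : Claim_equal_merge_query_py := by
  intro query1 query2 _
  unfold Spec_merge_query_py merge_query_py merge_query_py_alt
  have h1 := nodup_keys_split_query query1
  have h2 := nodup_keys_split_query query2
  cases hq1 : split_query query1 with
  | mk l1 =>
    cases hq2 : split_query query2 with
    | mk l2 =>
      rw [hq1] at h1
      rw [hq2] at h2
      exact congrArg join_query (core_merge l1 l2 h1 h2)
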